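-- pv_equiv track=rewrite | github.com/msft-mirror-aosp/platform.frameworks.libs.binary_translation | kernel_api/tools/extract_syscalls_from_kernel_src.py | _parse_protos
-- ===== SOURCE A (Python) =====
-- def _parse_protos(header_file):
--   res = {}
--
--   prefix = ''
--   proto = ''
--
--   for line in header_file:
--     line = line.strip()
--     if not line:
--       continue
--
--     # handle line concatenation (to skip protos within multiline #define)
--     if line.endswith('\\'):
--       prefix += line[:-1]
--       continue
--     if prefix:
--       line = prefix + line
--       prefix = ''
--
--     if line.startswith('asmlinkage long '):
--       assert not proto
--       proto = line
--     elif proto: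
--       proto += ' '
--       proto += line
--     else:
--       continue
--
--     if ');' in proto:
--       # As arch might have specific calling conventions, so prototype might be not precise.
--       # We'll extract precise prototype from DWARF.
--       # Here, we just distinguish entries with and without parameters.
--       # unfortunately, few entries have multiple protos, selection configured by arch defines
--       # (why not providing distinct entries instead???)
--       entry = proto[16: proto.find('(')].strip()
--       if '(void);' not in proto:
--         res[entry] = True
--       else:
--         res.setdefault(entry, False)
--       proto = ''
--
--   return res
-- ===== SOURCE B (Python) =====
-- def _parse_protos(header_file):
--   # pass 1: reconstruct logical lines (strip, drop blanks, join backslash continuations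
--   # without a space; a dangling unterminated continuation is never emitted)
--   logical = []
--   buf = ''
--   for raw in header_file:
--     line = raw.strip()
--     if not line:
--       continue
--     if line.endswith('\\'):
--       buf += line[:-1]
--     else:
--       logical.append(buf + line)
--       buf = ''
--
--   # pass 2: group logical lines into prototypes
--   res = {}
--   pieces = None  # lines of the currently open prototype, or None
--   for line in logical:
--     if line.startswith('asmlinkage long '):
--       assert pieces is None
--       pieces = [line]
--     elif pieces is not None:
--       pieces.append(line)
--     else:
--       continue
--     if ');' in line:
--       _finish(res, ' '.join(pieces))
--       pieces = None
--   return res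
--
--
-- def _finish(res, proto):
--   entry = proto[16: proto.find('(')].strip()
--   if '(void);' not in proto:
--     res[entry] = True
--   else:
--     res.setdefault(entry, False)
-- ===== Notes on version B (the rewrite author's own statement) =====
-- stated objective: alternative
-- what changed: Single 3-state pass (prefix buffer, proto string, dict) replaced by two passes: pass 1 reconstructs backslash-continued logical lines into a list, pass 2 groups those lines into prototypes as a list of pieces joined only when the terminating ');' piece arrives, via a _finish helper.
import Mathlib
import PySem

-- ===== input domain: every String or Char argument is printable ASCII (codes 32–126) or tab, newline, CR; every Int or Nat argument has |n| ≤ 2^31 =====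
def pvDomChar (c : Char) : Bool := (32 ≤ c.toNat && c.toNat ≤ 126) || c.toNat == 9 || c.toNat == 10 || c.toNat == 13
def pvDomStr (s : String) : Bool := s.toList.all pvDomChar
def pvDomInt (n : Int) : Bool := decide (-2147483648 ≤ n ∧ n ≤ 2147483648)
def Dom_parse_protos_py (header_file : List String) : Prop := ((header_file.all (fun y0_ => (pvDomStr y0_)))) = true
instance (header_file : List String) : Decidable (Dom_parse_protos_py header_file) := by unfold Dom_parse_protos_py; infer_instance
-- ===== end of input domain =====

-- B replaces A's single 3-state pass by two passes (logical-line reconstruction, then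
-- prototype grouping over a piece list joined at the terminator) — alternative decomposition,
-- same cost; equivalence proved on all inputs where A's assert does not fire (Pre_).

-- ===== PORT A =====
-- shared tail of A's loop body: the `if ');' in proto:` block, entered with the updated proto
def pA_check (res : PySem.Dict String Bool) (proto : List Char) :
    PySem.Dict String Bool × List Char × List Char :=
  if PySem.Chars.isIn [')', ';'] proto then
    let entry := PySem.Chars.strip
      (PySem.Chars.slice proto (some 16) (some (PySem.Chars.find proto ['('])))
    (if PySem.Chars.isIn "(void);".toList proto = false then
       res.insert (String.ofList entry) true
     else
       res.setdefault (String.ofList entry) false, [], [])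
  else (res, [], proto)

def pA_step (st : PySem.Dict String Bool × List Char × List Char) (raw : String) :
    PySem.Dict String Bool × List Char × List Char :=
  let res := st.1
  let pfx := st.2.1
  let proto := st.2.2
  let line := PySem.Chars.strip raw.toList
  if line = [] then (res, pfx, proto)
  else if PySem.Chars.endswith line ['\\'] then
    (res, pfx ++ PySem.Chars.slice line none (some (-1)), proto)
  else
    let line := if pfx ≠ [] then pfx ++ line else line
    if PySem.Chars.startswith line "asmlinkage long ".toList then
      -- Python's `assert not proto` raises AssertionError when proto ≠ ''; Pre_ excludes those inputs
      pA_check res line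
    else if proto ≠ [] then
      pA_check res (proto ++ ' ' :: line)
    else
      (res, [], proto)

def parse_protos_py (header_file : List String) : List (String × Bool) :=
  (header_file.foldl pA_step (PySem.Dict.empty, [], [])).1.items

-- ===== PORT B =====
-- pass-1 step: reconstruct one raw line into the (logical lines, continuation buffer) state
def pB_p1step (st : List (List Char) × List Char) (raw : String) :
    List (List Char) × List Char :=
  let line := PySem.Chars.strip raw.toList
  if line = [] then st
  else if PySem.Chars.endswith line ['\\'] then
    (st.1, st.2 ++ PySem.Chars.slice line none (some (-1)))
  else (st.1 ++ [st.2 ++ line], [])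

-- Source B's _finish helper: record one completed prototype
def pB_finish (res : PySem.Dict String Bool) (proto : List Char) : PySem.Dict String Bool :=
  let entry := PySem.Chars.strip
    (PySem.Chars.slice proto (some 16) (some (PySem.Chars.find proto ['('])))
  if PySem.Chars.isIn "(void);".toList proto = false then
    res.insert (String.ofList entry) true
  else
    res.setdefault (String.ofList entry) false

-- pass-2 step: group logical lines into prototypes (pieces : open prototype's lines, or none)
def pB_p2step (st : PySem.Dict String Bool × Option (List (List Char))) (line : List Char) :
    PySem.Dict String Bool × Option (List (List Char)) :=
  let cont : Option (List (List Char)) :=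
    if PySem.Chars.startswith line "asmlinkage long ".toList then
      -- Python's `assert pieces is None` raises here when a prototype is open; Pre_ excludes those inputs
      some [line]
    else
      match st.2 with
      | some ps => some (ps ++ [line])
      | none => none
  match cont with
  | none => st
  | some ps =>
    if PySem.Chars.isIn [')', ';'] line then
      (pB_finish st.1 (PySem.Chars.join [' '] ps), none)
    else (st.1, some ps)

def parse_protos_py_alt (header_file : List String) : List (String × Bool) :=
  let logical := (header_file.foldl pB_p1step ([], [])).1
  (logical.foldl pB_p2step (PySem.Dict.empty, none)).1.items

-- ===== PRECONDITION & SPEC =====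
-- helpers for Pre_ only (independent of both ports): the reconstructed logical lines
def pvLogical : List String → List Char → List (List Char)
  | [], _ => []
  | raw :: rest, buf =>
    let line := PySem.Chars.strip raw.toList
    if line = [] then pvLogical rest buf
    else if PySem.Chars.endswith line ['\\'] then
      pvLogical rest (buf ++ PySem.Chars.slice line none (some (-1)))
    else (buf ++ line) :: pvLogical rest []

def pvStarts (l : List Char) : Bool := PySem.Chars.startswith l "asmlinkage long ".toList

-- a "bad pair": two prototype-start logical lines with no ');' line in between —
-- exactly the inputs on which Python A's `assert not proto` raises AssertionError
def pvBad (ls : List (List Char)) : Bool :=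
  (List.range ls.length).any fun i =>
    pvStarts (ls.getD i []) &&
    ((List.range ls.length).any fun j =>
      decide (i < j) && pvStarts (ls.getD j []) &&
      ((List.range ls.length).all fun k =>
        !(decide (i ≤ k ∧ k < j)) || !(PySem.Chars.isIn [')', ';'] (ls.getD k []))))

-- Pre_ excludes exactly the inputs on which A (and B alike) raises AssertionError:
-- a second 'asmlinkage long ' logical line arriving while a prototype is still open
def Pre_parse_protos_py (header_file : List String) : Prop :=
  pvBad (pvLogical header_file []) = false
instance (header_file : List String) : Decidable (Pre_parse_protos_py header_file) := by
  unfold Pre_parse_protos_py; infer_instance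

def pvWitness_parse_protos_py : List String :=
  ["asmlinkage long sys_getpid(void);", "asmlinkage long sys_read(int fd,", "char *buf);"]

def Spec_parse_protos_py (header_file : List String) (out : List (String × Bool)) : Prop := out = parse_protos_py_alt header_file
instance (header_file : List String) (out : List (String × Bool)) : Decidable (Spec_parse_protos_py header_file out) := by unfold Spec_parse_protos_py; infer_instance

-- ===== CLAIM (what is proved, stated in full; the proofs are below) =====
def Claim_equal_parse_protos_py : Prop := ∀ (header_file : List String), Dom_parse_protos_py header_file → Pre_parse_protos_py header_file → Spec_parse_protos_py header_file (parse_protos_py header_file)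

-- ===== LEMMAS AND PROOFS =====

-- A's inner state machine on logical lines (state: dict × proto)
def stepA2 (st : PySem.Dict String Bool × List Char) (line : List Char) :
    PySem.Dict String Bool × List Char :=
  if pvStarts line then
    ((pA_check st.1 line).1, (pA_check st.1 line).2.2)
  else if st.2 ≠ [] then
    ((pA_check st.1 (st.2 ++ ' ' :: line)).1, (pA_check st.1 (st.2 ++ ' ' :: line)).2.2)
  else st

theorem pA_check_mid (res : PySem.Dict String Bool) (proto : List Char) :
    pA_check res proto = ((pA_check res proto).1, [], (pA_check res proto).2.2) := by
  unfold pA_check; split <;> rfl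

theorem fuseA : ∀ (raws : List String) (buf : List Char) (res : PySem.Dict String Bool)
    (proto : List Char),
    (raws.foldl pA_step (res, buf, proto)).1
      = ((pvLogical raws buf).foldl stepA2 (res, proto)).1 := by
  intro raws
  induction raws with
  | nil => intro buf res proto; simp [pvLogical]
  | cons raw rest ih =>
    intro buf res proto
    rw [List.foldl_cons]
    by_cases h1 : PySem.Chars.strip raw.toList = []
    · rw [show pA_step (res, buf, proto) raw = (res, buf, proto) from by simp [pA_step, h1]]
      rw [show pvLogical (raw :: rest) buf = pvLogical rest buf from by simp [pvLogical, h1]]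
      exact ih buf res proto
    · by_cases h2 : PySem.Chars.endswith (PySem.Chars.strip raw.toList) ['\\'] = true
      · rw [show pA_step (res, buf, proto) raw
            = (res, buf ++ PySem.Chars.slice (PySem.Chars.strip raw.toList) none (some (-1)), proto)
          from by simp [pA_step, h1, h2]]
        rw [show pvLogical (raw :: rest) buf
            = pvLogical rest (buf ++ PySem.Chars.slice (PySem.Chars.strip raw.toList) none (some (-1)))
          from by simp [pvLogical, h1, h2]]
        exact ih _ res proto
      · have hstep : pA_step (res, buf, proto) raw
            = ((stepA2 (res, proto) (buf ++ PySem.Chars.strip raw.toList)).1, ([] : List Char),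
               (stepA2 (res, proto) (buf ++ PySem.Chars.strip raw.toList)).2) := by
          have hline : (if buf ≠ [] then buf ++ PySem.Chars.strip raw.toList
              else PySem.Chars.strip raw.toList) = buf ++ PySem.Chars.strip raw.toList := by
            by_cases hb : buf = [] <;> simp [hb]
          simp only [pA_step, stepA2, pvStarts]
          rw [if_neg h1, if_neg h2, hline]
          split_ifs with h3 h4
          · exact pA_check_mid res _
          · exact pA_check_mid res _
          · rfl
        rw [hstep]
        rw [show pvLogical (raw :: rest) buf
            = (buf ++ PySem.Chars.strip raw.toList) :: pvLogical rest []
          from by simp [pvLogical, h1, h2]]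
        rw [List.foldl_cons]
        exact ih [] _ _

theorem pass1_eq : ∀ (raws : List String) (out : List (List Char)) (buf : List Char),
    (raws.foldl pB_p1step (out, buf)).1 = out ++ pvLogical raws buf := by
  intro raws
  induction raws with
  | nil => intro out buf; simp [pvLogical]
  | cons raw rest ih =>
    intro out buf
    simp only [List.foldl_cons, pB_p1step, pvLogical]
    by_cases h1 : PySem.Chars.strip raw.toList = []
    · simp [h1, ih]
    · by_cases h2 : PySem.Chars.endswith (PySem.Chars.strip raw.toList) ['\\'] = true
      · simp [h1, h2, ih]
      · simp [h1, h2, ih, List.append_assoc]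

theorem join_snoc : ∀ (ps : List (List Char)) (p : List Char), ps ≠ [] →
    PySem.Chars.join [' '] (ps ++ [p]) = PySem.Chars.join [' '] ps ++ ' ' :: p := by
  intro ps
  induction ps with
  | nil => intro p h; exact absurd rfl h
  | cons q rest ih =>
    intro p _
    cases rest with
    | nil =>
      rw [show ([q] ++ [p]) = [q, p] from rfl, PySem.Chars.join_cons_cons,
        PySem.Chars.join_singleton, PySem.Chars.join_singleton]
      simp
    | cons r rest' =>
      simp only [List.cons_append]
      rw [PySem.Chars.join_cons_cons, PySem.Chars.join_cons_cons,
        show (r :: (rest' ++ [p])) = (r :: rest') ++ [p] from rfl, ih p (by simp)]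
      simp

theorem prefix_nospan {t : List Char} {c : Char} (hc : c ∉ t) :
    ∀ (a b : List Char), t <+: a ++ c :: b → t <+: a := by
  induction t with
  | nil => intro a b _; exact List.nil_prefix
  | cons x t' ih =>
    intro a b h
    cases a with
    | nil =>
      simp only [List.nil_append] at h
      rcases List.cons_prefix_cons.mp h with ⟨hx, _⟩
      exact absurd (hx ▸ List.mem_cons_self) hc
    | cons y a' =>
      rcases List.cons_prefix_cons.mp h with ⟨hx, ht⟩
      exact List.cons_prefix_cons.mpr ⟨hx, ih (fun hm => hc (List.mem_cons_of_mem _ hm)) a' b ht⟩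

theorem infix_nospan {t : List Char} {c : Char} (hc : c ∉ t) :
    ∀ (a b : List Char), (t <:+: a ++ c :: b ↔ t <:+: a ∨ t <:+: b) := by
  intro a
  induction a with
  | nil =>
    intro b
    constructor
    · intro h
      simp only [List.nil_append] at h
      rcases List.infix_cons_iff.mp h with h | h
      · cases t with
        | nil => exact Or.inl List.nil_infix
        | cons x t' =>
          rcases List.cons_prefix_cons.mp h with ⟨hx, _⟩
          exact absurd (hx ▸ List.mem_cons_self) hc
      · exact Or.inr h
    · rintro (h | h)
      · rw [List.eq_nil_of_infix_nil h]
        exact List.nil_infix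
      · exact List.infix_cons_iff.mpr (Or.inr h)
  | cons y a' ih =>
    intro b
    constructor
    · intro h
      rcases List.infix_cons_iff.mp h with h | h
      · exact Or.inl (prefix_nospan hc (y :: a') b h).isInfix
      · rcases (ih b).mp h with h | h
        · exact Or.inl (List.infix_cons_iff.mpr (Or.inr h))
        · exact Or.inr h
    · rintro (h | h)
      · exact h.trans ⟨[], c :: b, by simp⟩
      · exact List.infix_cons_iff.mpr (Or.inr ((ih b).mpr (Or.inr h)))

theorem isIn_nospan {t : List Char} {c : Char} (hc : c ∉ t) (a b : List Char)
    (ha : PySem.Chars.isIn t a = false) :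
    PySem.Chars.isIn t (a ++ c :: b) = PySem.Chars.isIn t b := by
  cases hb : PySem.Chars.isIn t b with
  | false =>
    rw [PySem.Chars.isIn_eq_false_iff, infix_nospan hc]
    exact not_or.mpr ⟨(PySem.Chars.isIn_eq_false_iff t a).mp ha,
      (PySem.Chars.isIn_eq_false_iff t b).mp hb⟩
  | true =>
    rw [PySem.Chars.isIn_iff_infix, infix_nospan hc]
    exact Or.inr ((PySem.Chars.isIn_iff_infix t b).mp hb)

-- proof-side helper: closing a prototype behaves the same in both ports
theorem check_close (res : PySem.Dict String Bool) (proto : List Char)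
    (h : PySem.Chars.isIn [')', ';'] proto = true) :
    pA_check res proto = (pB_finish res proto, [], []) := by
  unfold pA_check pB_finish
  simp [h]

theorem check_open (res : PySem.Dict String Bool) (proto : List Char)
    (h : PySem.Chars.isIn [')', ';'] proto = false) :
    pA_check res proto = (res, [], proto) := by
  unfold pA_check
  rw [if_neg (by simp [h])]

def pvInv (p : PySem.Dict String Bool × List Char)
    (q : PySem.Dict String Bool × Option (List (List Char))) : Prop :=
  p.1 = q.1 ∧
    ((p.2 = [] ∧ q.2 = none) ∨
      ∃ ps, q.2 = some ps ∧ ps ≠ [] ∧ p.2 = PySem.Chars.join [' '] ps ∧ p.2 ≠ [] ∧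
        PySem.Chars.isIn [')', ';'] p.2 = false)

theorem starts_ne_nil {l : List Char} (h : pvStarts l = true) : l ≠ [] := by
  intro hl
  rw [pvStarts, hl, PySem.Chars.startswith_iff, List.prefix_nil] at h
  simp at h

theorem step_inv (p : PySem.Dict String Bool × List Char)
    (q : PySem.Dict String Bool × Option (List (List Char))) (l : List Char)
    (hinv : pvInv p q) : pvInv (stepA2 p l) (pB_p2step q l) := by
  obtain ⟨hres, hst⟩ := hinv
  by_cases hs : pvStarts l = true
  · -- a prototype-start line: both sides restart with proto = l / pieces = [l]
    have hA : stepA2 p l = ((pA_check p.1 l).1, (pA_check p.1 l).2.2) := by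
      unfold stepA2; rw [if_pos hs]
    have hB : pB_p2step q l =
        (if PySem.Chars.isIn [')', ';'] l then
          (pB_finish q.1 (PySem.Chars.join [' '] [l]), none)
         else (q.1, some [l])) := by
      unfold pvStarts at hs
      unfold pB_p2step
      rw [if_pos hs]
    cases hin : PySem.Chars.isIn [')', ';'] l with
    | true =>
      rw [hA, hB, if_pos hin, check_close p.1 l hin, PySem.Chars.join_singleton, hres]
      exact ⟨rfl, Or.inl ⟨rfl, rfl⟩⟩
    | false =>
      rw [hA, hB, if_neg (by simp [hin]), check_open p.1 l hin, hres]
      exact ⟨rfl, Or.inr ⟨[l], rfl, by simp, (PySem.Chars.join_singleton _ _).symm,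
        starts_ne_nil hs, hin⟩⟩
  · rcases hst with ⟨hp, hq⟩ | ⟨ps, hq, hps, hjoin, hne, hno⟩
    · -- no prototype open: both sides skip
      have hA : stepA2 p l = p := by unfold stepA2; rw [if_neg hs, if_neg (by simp [hp])]
      have hB : pB_p2step q l = q := by
        unfold pvStarts at hs
        unfold pB_p2step
        rw [if_neg hs, hq]
      rw [hA, hB]
      exact ⟨hres, Or.inl ⟨hp, hq⟩⟩
    · -- prototype open: A appends ' '+line to proto, B appends the piece to the list
      have hA : stepA2 p l
          = ((pA_check p.1 (p.2 ++ ' ' :: l)).1, (pA_check p.1 (p.2 ++ ' ' :: l)).2.2) := by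
        unfold stepA2; rw [if_neg hs, if_pos (by simp [hne])]
      have hB : pB_p2step q l =
          (if PySem.Chars.isIn [')', ';'] l then
            (pB_finish q.1 (PySem.Chars.join [' '] (ps ++ [l])), none)
           else (q.1, some (ps ++ [l]))) := by
        unfold pvStarts at hs
        unfold pB_p2step
        rw [if_neg hs, hq]
      have hspace : (' ' : Char) ∉ [')', ';'] := by decide
      have hiff : PySem.Chars.isIn [')', ';'] (p.2 ++ ' ' :: l) = PySem.Chars.isIn [')', ';'] l :=
        isIn_nospan hspace p.2 l hno
      have hjs : PySem.Chars.join [' '] (ps ++ [l]) = p.2 ++ ' ' :: l := by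
        rw [join_snoc ps l hps, hjoin]
      cases hin : PySem.Chars.isIn [')', ';'] l with
      | true =>
        rw [hA, hB, if_pos hin, check_close p.1 _ (by rw [hiff]; exact hin), hjs, hres]
        exact ⟨rfl, Or.inl ⟨rfl, rfl⟩⟩
      | false =>
        rw [hA, hB, if_neg (by simp [hin]), check_open p.1 _ (by rw [hiff]; exact hin), hres]
        exact ⟨rfl, Or.inr ⟨ps ++ [l], rfl, by simp, hjs.symm, by simp, by rw [hiff]; exact hin⟩⟩

theorem foldl_inv : ∀ (ls : List (List Char)) (p : PySem.Dict String Bool × List Char)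
    (q : PySem.Dict String Bool × Option (List (List Char))), pvInv p q →
    (ls.foldl stepA2 p).1 = (ls.foldl pB_p2step q).1 := by
  intro ls
  induction ls with
  | nil => intro p q h; exact h.1
  | cons l rest ih =>
    intro p q h
    simp only [List.foldl_cons]
    exact ih _ _ (step_inv p q l h)

-- ===== VERDICT (by name: the statement is the Claim_ definition above) =====
theorem parse_protos_py_spec : Claim_equal_parse_protos_py := by
  intro header_file _hdom _hpre
  unfold Spec_parse_protos_py parse_protos_py parse_protos_py_alt
  rw [fuseA header_file [] PySem.Dict.empty []]
  show _ = ((header_file.foldl pB_p1step ([], [])).1.foldl pB_p2step (PySem.Dict.empty, none)).1.items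
  rw [show (header_file.foldl pB_p1step ([], [])).1 = pvLogical header_file [] from by
    rw [pass1_eq]; simp]
  rw [foldl_inv (pvLogical header_file []) (PySem.Dict.empty, [])
    (PySem.Dict.empty, none) ⟨rfl, Or.inl ⟨rfl, rfl⟩⟩]
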